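-- pv_equiv track=rewrite | github.com/patpietryg/MiTK7.1 | main.py | decrypt_homophonic
-- ===== SOURCE A (Python) =====
-- def decrypt_homophonic(encrypted_text, key):
--     reverse_key = {}
--     for letter, symbols in key.items():
--         for symbol in symbols:
--             reverse_key[symbol] = letter
--
--     decrypted_text = ''
--     for char in encrypted_text:
--         if char in reverse_key:
--             decrypted_text += reverse_key[char]
--         else:
--             decrypted_text += char
--     return decrypted_text
-- ===== SOURCE B (Python) =====
-- def decrypt_homophonic(encrypted_text, key):
--     out = []
--     for char in encrypted_text:
--         match = None
--         for letter, symbols in key.items():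
--             if char in symbols:
--                 match = letter
--         out.append(match if match is not None else char)
--     return ''.join(out)
-- ===== Notes on version B (the rewrite author's own statement) =====
-- stated objective: alternative
-- what changed: B drops A's precomputed reverse dictionary and instead, for each character, scans all key items keeping the last letter whose symbol list contains it (matching dict-overwrite semantics), joining the pieces at the end.
import Mathlib
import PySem

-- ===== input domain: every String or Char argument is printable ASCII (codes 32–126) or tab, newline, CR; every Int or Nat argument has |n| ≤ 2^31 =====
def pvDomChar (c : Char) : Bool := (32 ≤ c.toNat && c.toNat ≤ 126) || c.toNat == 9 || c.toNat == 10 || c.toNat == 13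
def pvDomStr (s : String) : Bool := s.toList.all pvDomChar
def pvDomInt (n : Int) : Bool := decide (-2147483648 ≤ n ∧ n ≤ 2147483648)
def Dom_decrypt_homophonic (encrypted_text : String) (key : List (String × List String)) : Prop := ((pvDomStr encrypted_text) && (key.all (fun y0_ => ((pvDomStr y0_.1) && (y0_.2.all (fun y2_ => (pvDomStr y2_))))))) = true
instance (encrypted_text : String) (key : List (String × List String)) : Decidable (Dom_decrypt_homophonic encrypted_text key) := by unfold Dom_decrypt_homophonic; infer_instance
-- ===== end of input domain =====

-- B replaces A's precomputed reverse dictionary with a per-character last-match scan of the key (alternative decomposition, same results).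
-- ===== PORT A =====
def decrypt_homophonic (encrypted_text : String) (key : List (String × List String)) : String :=
  let reverse_key : PySem.Dict String String :=
    key.foldl (fun d p => p.2.foldl (fun d symbol => d.insert symbol p.1) d) PySem.Dict.empty
  encrypted_text.toList.foldl (fun decrypted_text c =>
    match reverse_key.get? (String.mk [c]) with
    | some l => decrypted_text ++ l
    | none => decrypted_text ++ String.mk [c]) ""

-- ===== PORT B =====
def decrypt_homophonic_alt (encrypted_text : String) (key : List (String × List String)) : String :=
  (encrypted_text.toList.map (fun c =>
    match key.foldl (fun m p => if String.mk [c] ∈ p.2 then some p.1 else m) none with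
    | some l => l
    | none => String.mk [c])).foldl (· ++ ·) ""

-- ===== PRECONDITION & SPEC =====
def Spec_decrypt_homophonic (encrypted_text : String) (key : List (String × List String)) (out : String) : Prop := out = decrypt_homophonic_alt encrypted_text key
instance (encrypted_text : String) (key : List (String × List String)) (out : String) : Decidable (Spec_decrypt_homophonic encrypted_text key out) := by unfold Spec_decrypt_homophonic; infer_instance

-- ===== CLAIM (what is proved, stated in full; the proofs are below) =====
def Claim_equal_decrypt_homophonic : Prop := ∀ (encrypted_text : String) (key : List (String × List String)), Dom_decrypt_homophonic encrypted_text key → Spec_decrypt_homophonic encrypted_text key (decrypt_homophonic encrypted_text key)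

-- ===== LEMMAS AND PROOFS =====

-- looking up s after inserting every symbol of syms with value letter
theorem pv_inner (syms : List String) (d : PySem.Dict String String) (letter s : String) :
    (syms.foldl (fun d sym => d.insert sym letter) d).get? s
      = if s ∈ syms then some letter else d.get? s := by
  induction syms generalizing d with
  | nil => simp
  | cons a l ih =>
      simp only [List.foldl_cons, ih, PySem.Dict.get?_insert, List.mem_cons]
      by_cases h1 : s ∈ l <;> by_cases h2 : s = a <;> simp [h1, h2]

-- a last-match fold from an arbitrary start
theorem pv_lastfold (ps : List (String × List String)) (a : Option String) (s : String) :
    ps.foldl (fun m p => if s ∈ p.2 then some p.1 else m) a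
      = (ps.foldl (fun m p => if s ∈ p.2 then some p.1 else m) none).elim a some := by
  induction ps generalizing a with
  | nil => simp
  | cons q qs ih =>
      simp only [List.foldl_cons]
      rw [ih, ih (if s ∈ q.2 then some q.1 else none)]
      cases qs.foldl (fun m p => if s ∈ p.2 then some p.1 else m) none <;>
        by_cases h : s ∈ q.2 <;> simp [h]

-- A's reverse dictionary lookup equals B's last-match scan
theorem pv_outer (key : List (String × List String)) (d0 : PySem.Dict String String) (s : String) :
    (key.foldl (fun d p => p.2.foldl (fun d symbol => d.insert symbol p.1) d) d0).get? s
      = (key.foldl (fun m p => if s ∈ p.2 then some p.1 else m) none).elim (d0.get? s) some := by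
  induction key generalizing d0 with
  | nil => simp
  | cons q qs ih =>
      simp only [List.foldl_cons]
      rw [ih, pv_lastfold qs (if s ∈ q.2 then some q.1 else none), pv_inner]
      cases qs.foldl (fun m p => if s ∈ p.2 then some p.1 else m) none <;>
        by_cases h : s ∈ q.2 <;> simp [h]

-- ===== VERDICT (by name: the statement is the Claim_ definition above) =====
theorem decrypt_homophonic_spec : Claim_equal_decrypt_homophonic := by
  intro t key _
  unfold Spec_decrypt_homophonic decrypt_homophonic decrypt_homophonic_alt
  rw [List.foldl_map]
  refine congrFun (congrFun (congrArg _ (funext fun acc => funext fun c => ?_)) _) _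
  rw [pv_outer]
  cases key.foldl (fun m p => if String.mk [c] ∈ p.2 then some p.1 else m) none <;> simp
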